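-- pv_equiv track=rewrite | github.com/WuLC/LeetCode | Algorithm/Python/504. Base 7.py | convertToBase7
-- ===== SOURCE A (Python) =====
-- def convertToBase7(num):
--     """
--     :type num: int
--     :rtype: str
--     """
--     if num == 0: return '0'
--     flag = 1
--     if num < 0:
--         flag = -1
--         num = -num
--     result = ''
--     while num:
--         num, bit = divmod(num, 7)
--         result = str(bit) + result
--     if flag == -1:
--         result = '-'+result
--     return result
-- ===== SOURCE B (Python) =====
-- def convertToBase7(num):
--     if num < 0:
--         return '-' + convertToBase7(-num)
--     if num < 7:
--         return str(num)
--     return convertToBase7(num // 7) + str(num % 7)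
-- ===== Notes on version B (the rewrite author's own statement) =====
-- stated objective: simpler
-- what changed: Replaced the explicit while-loop with sign flag and string prepending by direct recursion on the quotient: sign handled once at the top, single-digit base case, recursive step appends the last digit.
import Mathlib
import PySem

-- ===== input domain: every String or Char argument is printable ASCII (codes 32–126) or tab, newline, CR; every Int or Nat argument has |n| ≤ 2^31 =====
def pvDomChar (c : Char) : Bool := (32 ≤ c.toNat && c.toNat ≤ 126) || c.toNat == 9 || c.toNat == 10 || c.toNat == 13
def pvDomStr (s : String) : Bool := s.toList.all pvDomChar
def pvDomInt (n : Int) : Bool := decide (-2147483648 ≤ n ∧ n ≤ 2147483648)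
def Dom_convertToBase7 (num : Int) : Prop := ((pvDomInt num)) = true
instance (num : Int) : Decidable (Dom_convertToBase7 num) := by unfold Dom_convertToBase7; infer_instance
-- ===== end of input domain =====

-- B recurses on the quotient instead of A's while loop; equivalence proved on all ints.

-- ===== PORT A =====
-- A's while loop runs on the (made nonnegative) num, so it is ported as structural
-- recursion on a Nat; divmod on nonnegative operands is exactly Nat / and %.
def convertToBase7Loop (n : Nat) (result : String) : String :=
  if _h : n = 0 then result
  else convertToBase7Loop (n / 7) (PySem.Int.toStr ((n % 7 : Nat) : Int) ++ result)
termination_by n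
decreasing_by exact Nat.div_lt_self (Nat.pos_of_ne_zero _h) (by norm_num)

def convertToBase7 (num : Int) : String :=
  if num = 0 then "0"
  else if num < 0 then "-" ++ convertToBase7Loop (-num).toNat ""
  else convertToBase7Loop num.toNat ""

-- ===== PORT B =====
def convertToBase7_alt (num : Int) : String :=
  if _h : num < 0 then "-" ++ convertToBase7_alt (-num)
  else if _h2 : num < 7 then PySem.Int.toStr num
  else convertToBase7_alt (PySem.Int.floordiv num 7) ++ PySem.Int.toStr (PySem.Int.mod num 7)
termination_by 2 * num.natAbs + (if num < 0 then 1 else 0)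
decreasing_by
  · have h1 : (-num).natAbs = num.natAbs := Int.natAbs_neg num
    have h2 : ¬(-num < 0) := by omega
    simp only [h1, h2, if_false, if_pos _h]
    omega
  · rw [PySem.Int.floordiv_eq_ediv_of_pos (by norm_num : (0:Int) < 7)]
    have h1 : 0 ≤ num / 7 := Int.ediv_nonneg (by omega) (by norm_num)
    have h2 : num / 7 < num := by omega
    have h3 : (num / 7).natAbs < num.natAbs := by omega
    have h4 : ¬(num / 7 < 0) := by omega
    simp only [h4, if_false, if_neg _h]
    omega

-- ===== PRECONDITION & SPEC =====
def Spec_convertToBase7 (num : Int) (out : String) : Prop := out = convertToBase7_alt num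
instance (num : Int) (out : String) : Decidable (Spec_convertToBase7 num out) := by unfold Spec_convertToBase7; infer_instance

-- ===== CLAIM (what is proved, stated in full; the proofs are below) =====
def Claim_equal_convertToBase7 : Prop := ∀ (num : Int), Dom_convertToBase7 num → Spec_convertToBase7 num (convertToBase7 num)

-- ===== LEMMAS AND PROOFS =====

-- A's loop, started at a positive n, produces B's digits followed by the accumulator.
theorem convertToBase7Loop_eq_alt (n : Nat) (hn : 0 < n) :
    ∀ s : String, convertToBase7Loop n s = convertToBase7_alt (n : Int) ++ s := by
  induction n using Nat.strong_induction_on with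
  | _ n ih =>
    intro s
    rw [convertToBase7Loop]
    rw [dif_neg (Nat.pos_iff_ne_zero.mp hn)]
    by_cases h7 : n < 7
    · rw [convertToBase7Loop, dif_pos (by omega : n / 7 = 0)]
      rw [convertToBase7_alt]
      rw [dif_neg (by exact_mod_cast Int.not_lt.mpr (Int.natCast_nonneg n))]
      rw [dif_pos (by exact_mod_cast h7)]
      have : ((n % 7 : Nat) : Int) = (n : Int) := by omega
      rw [this]
    · have hq : 0 < n / 7 := Nat.div_pos (by omega) (by norm_num)
      rw [ih (n / 7) (Nat.div_lt_self hn (by norm_num)) hq]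
      conv_rhs => rw [convertToBase7_alt]
      rw [dif_neg (by exact_mod_cast Int.not_lt.mpr (Int.natCast_nonneg n))]
      rw [dif_neg (by exact_mod_cast h7)]
      have hfd : PySem.Int.floordiv (n : Int) 7 = ((n / 7 : Nat) : Int) := by
        exact_mod_cast PySem.Int.floordiv_natCast n 7
      have hmd : PySem.Int.mod (n : Int) 7 = ((n % 7 : Nat) : Int) := by
        exact_mod_cast PySem.Int.mod_natCast n 7
      rw [hfd, hmd, String.append_assoc]

theorem convertToBase7_spec' (num : Int) : convertToBase7 num = convertToBase7_alt num := by
  unfold convertToBase7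
  by_cases h0 : num = 0
  · subst h0
    rw [if_pos rfl, convertToBase7_alt, dif_neg (by norm_num), dif_pos (by norm_num)]
    rfl
  · rw [if_neg h0]
    by_cases hneg : num < 0
    · rw [if_pos hneg]
      have hpos : 0 < -num := by omega
      have : ((-num).toNat : Int) = -num := Int.toNat_of_nonneg (by omega)
      rw [convertToBase7Loop_eq_alt (-num).toNat (by omega) "", this]
      conv_rhs => rw [convertToBase7_alt, dif_pos hneg]
      simp
    · rw [if_neg hneg]
      have : (num.toNat : Int) = num := Int.toNat_of_nonneg (by omega)
      rw [convertToBase7Loop_eq_alt num.toNat (by omega) "", this]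
      simp

-- ===== VERDICT (by name: the statement is the Claim_ definition above) =====
theorem convertToBase7_spec : Claim_equal_convertToBase7 := by
  intro num _
  exact convertToBase7_spec' num
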